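-- pv_equiv track=rewrite | github.com/Gruffuss/ha-ml-predictor | fix_flake8_advanced.py | remove_duplicate_exceptions
-- ===== SOURCE A (Python) =====
-- def remove_duplicate_exceptions(content):
--     """Remove duplicate exception definitions (F811)."""
--     # Find and remove duplicate class definitions
--     lines = content.split('\n')
--     seen_classes = set()
--     filtered_lines = []
--     skip_class = False
--
--     for line in lines:
--         stripped = line.strip()
--
--         # Check for class definitions
--         if stripped.startswith('class ') and ':' in stripped:
--             class_name = stripped.split('class ')[1].split('(')[0].split(':')[0].strip()
--
--             # Skip duplicate definitions of error classes
--             if (class_name.endswith('Error') or class_name.endswith('Exception')) and class_name in seen_classes: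
--                 skip_class = True
--                 continue
--
--             seen_classes.add(class_name)
--             skip_class = False
--         elif skip_class and stripped and not stripped.startswith('class '):
--             # Skip lines that are part of duplicate class
--             if line.startswith('    ') or line.startswith('\t'):
--                 continue
--             else:
--                 skip_class = False
--
--         if not skip_class:
--             filtered_lines.append(line)
--
--     return '\n'.join(filtered_lines)
-- ===== SOURCE B (Python) =====
-- def remove_duplicate_exceptions(content):
--     """Remove duplicate exception definitions (F811) - index-based skip-consuming rewrite."""
--     lines = content.split('\n')
--     seen_classes = set()
--     out = []
--     i = 0
--     n = len(lines)
--     while i < n: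
--         line = lines[i]
--         stripped = line.strip()
--         if stripped.startswith('class ') and ':' in stripped:
--             class_name = stripped.split('class ')[1].split('(')[0].split(':')[0].strip()
--             if (class_name.endswith('Error') or class_name.endswith('Exception')) and class_name in seen_classes:
--                 # consume the duplicate class's block instead of carrying a skip flag
--                 i += 1
--                 while i < n:
--                     s = lines[i].strip()
--                     if s.startswith('class ') and ':' in s:
--                         break
--                     if s and not s.startswith('class '):
--                         if lines[i].startswith('    ') or lines[i].startswith('\t'):
--                             i += 1
--                         else:
--                             break
--                     else:
--                         i += 1
--                 continue
--             seen_classes.add(class_name)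
--         out.append(line)
--         i += 1
--     return '\n'.join(out)
-- ===== Notes on version B (the rewrite author's own statement) =====
-- stated objective: alternative
-- what changed: Replaces A's per-line skip_class flag threaded through one for loop by an index-based while loop that, upon a duplicate Error/Exception class header, consumes the class body in an inner loop (stopping at a class header or a non-indented non-blank line) and never materialises a skip state.
import Mathlib
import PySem

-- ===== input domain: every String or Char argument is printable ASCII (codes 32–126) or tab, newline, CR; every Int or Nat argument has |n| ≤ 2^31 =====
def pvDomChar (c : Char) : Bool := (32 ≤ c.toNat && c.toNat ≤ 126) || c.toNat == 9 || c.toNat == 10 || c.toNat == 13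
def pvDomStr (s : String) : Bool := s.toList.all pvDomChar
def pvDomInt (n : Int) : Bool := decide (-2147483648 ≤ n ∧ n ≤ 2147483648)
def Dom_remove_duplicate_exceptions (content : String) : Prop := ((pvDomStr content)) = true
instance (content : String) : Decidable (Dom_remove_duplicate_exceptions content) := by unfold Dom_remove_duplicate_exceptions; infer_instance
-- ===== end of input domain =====

-- B replaces A's per-line skip_class flag by an index-style loop that, on a duplicate class header,
-- consumes the class body in an inner loop; same return value (objective: alternative decomposition).

-- ===== PORT A =====
-- str.split with a non-empty separator; split? is none only for sep = "", so .getD [] is exact here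
def pvSplit (s sep : String) : List String := (PySem.Str.split? s sep).getD []

-- stripped.split('class ')[1].split('(')[0].split(':')[0].strip() — the [1] is only reached when
-- stripped startswith 'class ', so the Python indexing never raises; .getD 1 "" / .headD "" are exact there.
def pvClassName (stripped : String) : String :=
  PySem.Str.strip ((pvSplit ((pvSplit ((pvSplit stripped "class ").getD 1 "") "(").headD "") ":").headD "")

-- the for-loop of A, state = (seen_classes, filtered_lines, skip_class)
def pvALoop (lines : List String) (seen : PySem.Set String) (filtered : List String) (skip : Bool) : List String :=
  match lines with
  | [] => filtered
  | line :: rest =>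
    let stripped := PySem.Str.strip line
    if PySem.Str.startswith stripped "class " && PySem.Str.isIn ":" stripped then
      let class_name := pvClassName stripped
      if (PySem.Str.endswith class_name "Error" || PySem.Str.endswith class_name "Exception")
          && PySem.Set.contains seen class_name then
        pvALoop rest seen filtered true
      else
        pvALoop rest (PySem.Set.add seen class_name) (filtered ++ [line]) false
    else if skip && !(stripped == "") && !PySem.Str.startswith stripped "class " then
      if PySem.Str.startswith line "    " || PySem.Str.startswith line "\t" then
        pvALoop rest seen filtered true
      else
        pvALoop rest seen (filtered ++ [line]) false
    else if skip then pvALoop rest seen filtered skip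
    else pvALoop rest seen (filtered ++ [line]) skip

def remove_duplicate_exceptions (content : String) : String :=
  PySem.Str.join "\n" (pvALoop (pvSplit content "\n") PySem.Set.empty [] false)

-- ===== PORT B =====
-- the inner while loop of B: consume the body of a duplicate class, return the remaining lines
def pvBSkip (lines : List String) : List String :=
  match lines with
  | [] => []
  | line :: rest =>
    let s := PySem.Str.strip line
    if PySem.Str.startswith s "class " && PySem.Str.isIn ":" s then line :: rest
    else if !(s == "") && !PySem.Str.startswith s "class " then
      if PySem.Str.startswith line "    " || PySem.Str.startswith line "\t" then pvBSkip rest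
      else line :: rest
    else pvBSkip rest

theorem pvBSkip_length_le (lines : List String) : (pvBSkip lines).length ≤ lines.length := by
  induction lines with
  | nil => simp [pvBSkip]
  | cons l rest ih =>
    simp only [pvBSkip]
    split_ifs <;> simp <;> omega

-- the outer while loop of B
def pvBLoop (lines : List String) (seen : PySem.Set String) : List String :=
  match lines with
  | [] => []
  | line :: rest =>
    let stripped := PySem.Str.strip line
    if PySem.Str.startswith stripped "class " && PySem.Str.isIn ":" stripped then
      let class_name := pvClassName stripped
      if (PySem.Str.endswith class_name "Error" || PySem.Str.endswith class_name "Exception")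
          && PySem.Set.contains seen class_name then
        pvBLoop (pvBSkip rest) seen
      else
        line :: pvBLoop rest (PySem.Set.add seen class_name)
    else line :: pvBLoop rest seen
termination_by lines.length
decreasing_by
  · exact Nat.lt_succ_of_le (pvBSkip_length_le rest)
  · exact Nat.lt_succ_self _
  · exact Nat.lt_succ_self _

def remove_duplicate_exceptions_alt (content : String) : String :=
  PySem.Str.join "\n" (pvBLoop (pvSplit content "\n") PySem.Set.empty)

-- ===== PRECONDITION & SPEC =====
def Spec_remove_duplicate_exceptions (content : String) (out : String) : Prop := out = remove_duplicate_exceptions_alt content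
instance (content : String) (out : String) : Decidable (Spec_remove_duplicate_exceptions content out) := by unfold Spec_remove_duplicate_exceptions; infer_instance

-- ===== CLAIM (what is proved, stated in full; the proofs are below) =====
def Claim_equal_remove_duplicate_exceptions : Prop := ∀ (content : String), Dom_remove_duplicate_exceptions content → Spec_remove_duplicate_exceptions content (remove_duplicate_exceptions content)

-- ===== LEMMAS AND PROOFS =====

-- while skipping, A drops exactly the lines pvBSkip consumes, then resumes with skip = false
theorem pvALoop_skip (lines : List String) (seen : PySem.Set String) (filtered : List String) :
    pvALoop lines seen filtered true = pvALoop (pvBSkip lines) seen filtered false := by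
  induction lines generalizing filtered with
  | nil => simp [pvALoop, pvBSkip]
  | cons l rest ih =>
    simp only [pvALoop, pvBSkip]
    split_ifs <;> simp_all [pvALoop]
theorem pvALoop_eq_pvBLoop (n : Nat) (lines : List String) (seen : PySem.Set String)
    (filtered : List String) (hn : lines.length ≤ n) :
    pvALoop lines seen filtered false = filtered ++ pvBLoop lines seen := by
  induction n generalizing lines seen filtered with
  | zero =>
    have : lines = [] := List.eq_nil_of_length_eq_zero (Nat.le_zero.mp hn)
    subst this; simp [pvALoop, pvBLoop]
  | succ n ih =>
    match lines with
    | [] => simp [pvALoop, pvBLoop]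
    | l :: rest =>
      have hr : rest.length ≤ n := by simpa using Nat.succ_le_succ_iff.mp (by simpa using hn)
      by_cases h1 : (PySem.Str.startswith (PySem.Str.strip l) "class "
          && PySem.Str.isIn ":" (PySem.Str.strip l)) = true
      · by_cases h2 : ((PySem.Str.endswith (pvClassName (PySem.Str.strip l)) "Error"
            || PySem.Str.endswith (pvClassName (PySem.Str.strip l)) "Exception")
            && PySem.Set.contains seen (pvClassName (PySem.Str.strip l))) = true
        · simp only [pvALoop, pvBLoop, h1, h2, if_true]
          rw [pvALoop_skip]
          exact ih (pvBSkip rest) seen filtered (le_trans (pvBSkip_length_le rest) hr)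
        · simp only [pvALoop, pvBLoop, h1, h2, if_true]
          rw [ih rest _ _ hr]
          simp
      · simp only [pvALoop, pvBLoop, h1, Bool.false_and, Bool.false_eq_true, if_false,
          Bool.false_and]
        rw [ih rest _ _ hr]
        simp

-- ===== VERDICT (by name: the statement is the Claim_ definition above) =====
theorem remove_duplicate_exceptions_spec : Claim_equal_remove_duplicate_exceptions := by
  intro content _
  unfold Spec_remove_duplicate_exceptions remove_duplicate_exceptions remove_duplicate_exceptions_alt
  rw [pvALoop_eq_pvBLoop (pvSplit content "\n").length _ _ _ le_rfl]
  simp
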